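-- pv_equiv track=rewrite | github.com/acontius/Broken-glass | Main.py | count_arrangements_recursive
-- ===== SOURCE A (Python) =====
-- def count_arrangements_recursive(n, pieces, width_sum, height_sum, mask, memo):
--     if mask == (1 << n) - 1:
--         return 1
--
--     if (mask, width_sum, height_sum) in memo:
--         return memo[(mask, width_sum, height_sum)]
--
--     total_arrangements = 0
--
--     for i in range(n):
--         if (mask & (1 << i)) == 0:
--             new_width_sum = max(width_sum, pieces[i][0])
--             new_height_sum = max(height_sum, pieces[i][1])
--             new_mask = mask | (1 << i)
--
--             total_arrangements += count_arrangements_recursive(n, pieces, new_width_sum, new_height_sum, new_mask, memo)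
--
--             if width_sum + pieces[i][1] <= new_height_sum and height_sum + pieces[i][0] <= new_width_sum:
--                 total_arrangements += count_arrangements_recursive(n, pieces, new_height_sum, new_width_sum, new_mask,
--                                                                    memo)
--
--     memo[(mask, width_sum, height_sum)] = total_arrangements
--     return total_arrangements
-- ===== SOURCE B (Python) =====
-- def count_arrangements_recursive(n, pieces, width_sum, height_sum, mask, memo):
--     # Forward (bottom-up) tabulation of the same recurrence: states are expanded
--     # level by level (one placed piece per level), path counts are merged per state,
--     # and seeded memo entries / full masks act as terminal states.
--     # Note: unlike the original, this does not write new entries into `memo`;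
--     # the return value is the same.
--     full = (1 << n) - 1
--     result = 0
--     level = {(mask, width_sum, height_sum): 1}
--     while level:
--         next_level = {}
--         for (m, w, h), c in level.items():
--             if m == full:
--                 result += c
--             elif (m, w, h) in memo:
--                 result += c * memo[(m, w, h)]
--             else:
--                 for i in range(n):
--                     if (m >> i) & 1 == 0:
--                         nw = max(w, pieces[i][0])
--                         nh = max(h, pieces[i][1])
--                         nm = m | (1 << i)
--                         key = (nm, nw, nh)
--                         next_level[key] = next_level.get(key, 0) + c
--                         if w + pieces[i][1] <= nh and h + pieces[i][0] <= nw: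
--                             key2 = (nm, nh, nw)
--                             next_level[key2] = next_level.get(key2, 0) + c
--         level = next_level
--     return result
-- ===== Notes on version B (the rewrite author's own statement) =====
-- stated objective: alternative
-- what changed: Replaces the top-down memoized recursion by a bottom-up forward tabulation: states are expanded level by level (one placed piece per level) in a dict of path counts, with full masks and pre-seeded memo entries acting as terminal states; no new memo entries are written.
-- outside the precondition, e.g. on count_arrangements_recursive(1, [], 0, 0, 0, {(0, 0, 0): 5}): A returns 5, B returns 5
import Mathlib
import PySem

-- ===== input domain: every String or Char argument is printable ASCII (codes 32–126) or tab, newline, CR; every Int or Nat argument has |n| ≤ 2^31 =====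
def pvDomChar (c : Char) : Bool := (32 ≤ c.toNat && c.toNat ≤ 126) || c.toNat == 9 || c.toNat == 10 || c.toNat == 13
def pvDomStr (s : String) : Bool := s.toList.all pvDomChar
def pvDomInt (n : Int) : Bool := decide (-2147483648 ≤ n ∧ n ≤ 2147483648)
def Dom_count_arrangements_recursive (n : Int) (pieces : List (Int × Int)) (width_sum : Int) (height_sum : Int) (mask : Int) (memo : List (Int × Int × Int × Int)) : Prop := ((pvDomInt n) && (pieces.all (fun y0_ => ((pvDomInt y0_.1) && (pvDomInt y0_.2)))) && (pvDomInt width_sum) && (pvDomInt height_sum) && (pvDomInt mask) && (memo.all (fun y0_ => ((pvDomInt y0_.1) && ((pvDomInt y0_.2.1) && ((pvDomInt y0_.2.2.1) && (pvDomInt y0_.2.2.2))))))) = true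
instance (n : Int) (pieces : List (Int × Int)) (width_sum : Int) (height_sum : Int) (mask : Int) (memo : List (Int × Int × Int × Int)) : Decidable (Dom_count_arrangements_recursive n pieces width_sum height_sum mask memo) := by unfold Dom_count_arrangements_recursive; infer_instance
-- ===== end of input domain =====

-- B replaces A's top-down memoized recursion by a bottom-up level-by-level tabulation of
-- the same recurrence (alternative decomposition, same cost); A mutates the passed-in memo
-- dict, B does not — the equivalence proved here is about the RETURN value only.


-- shared primitive helpers: Python's (1 << i) and (m >> i) pinned to the Nat-shift instance
def pvBit (i : Nat) : Int := (1 : Int) <<< i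
def pvShr (a : Int) (k : Nat) : Int := a >>> k
-- the memo dict argument, rebuilt as a Python dict by successive insertion (shared input conversion)
def pvMemoDict (memo : List (Int × Int × Int × Int)) : PySem.Dict (Int × Int × Int) Int :=
  PySem.Dict.ofList (memo.map (fun q => ((q.1, q.2.1, q.2.2.1), q.2.2.2)))

-- ===== PORT A =====
-- literal transliteration of A: memoized recursion; fuel (n.toNat+1) is a totality guard only,
-- never exhausted (each recursive call sets one more of the ≤ n unset low bits of mask).
-- pieces[i] is PySem.List.pyGetD with a dummy default: Pre_ excludes the IndexError inputs.
-- mask & (1 << i) is PySem.Int.band mask (pvBit i) (exact, also for negative mask);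
-- (1 << n) is pvBit n.toNat (exact for 0 ≤ n; n < 0 raises in Python, excluded by Pre_).
def goA (n : Int) (pieces : List (Int × Int)) :
    Nat → Int → Int → Int → PySem.Dict (Int × Int × Int) Int →
    Int × PySem.Dict (Int × Int × Int) Int
  | 0, _, _, _, memo => (0, memo)
  | fuel+1, width_sum, height_sum, mask, memo =>
    if mask = pvBit n.toNat - 1 then (1, memo)
    else
      match memo.get? (mask, width_sum, height_sum) with
      | some v => (v, memo)
      | none =>
        let r := (PySem.List.pyRange 0 n 1).foldl
          (fun (acc : Int × PySem.Dict (Int × Int × Int) Int) i =>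
            if PySem.Int.band mask (pvBit i.toNat) = 0 then
              let p := PySem.List.pyGetD pieces i (0, 0)
              let nw := max width_sum p.1
              let nh := max height_sum p.2
              let nm := PySem.Int.bor mask (pvBit i.toNat)
              let r1 := goA n pieces fuel nw nh nm acc.2
              if width_sum + p.2 ≤ nh ∧ height_sum + p.1 ≤ nw then
                let r2 := goA n pieces fuel nh nw nm r1.2
                (acc.1 + r1.1 + r2.1, r2.2)
              else (acc.1 + r1.1, r1.2)
            else acc) ((0 : Int), memo)
        (r.1, r.2.insert (mask, width_sum, height_sum) r.1)

def count_arrangements_recursive (n : Int) (pieces : List (Int × Int)) (width_sum : Int) (height_sum : Int) (mask : Int) (memo : List (Int × Int × Int × Int)) : Int :=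
  (goA n pieces (n.toNat + 1) width_sum height_sum mask (pvMemoDict memo)).1

-- ===== PORT B =====
-- literal transliteration of B (Source B): forward tabulation; the body of the per-state loop is
-- the helper goBStep; `while level:` becomes fuel recursion (fuel n.toNat+2 is a totality
-- guard only: each level sets one more low bit).  (m >> i) & 1 is PySem.Int.band (pvShr m i) 1
-- (exact, also for negative m).
def goBStep (n : Int) (pieces : List (Int × Int)) (memo0 : PySem.Dict (Int × Int × Int) Int)
    (acc : Int × PySem.Dict (Int × Int × Int) Int) (kv : (Int × Int × Int) × Int) :
    Int × PySem.Dict (Int × Int × Int) Int :=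
  if kv.1.1 = pvBit n.toNat - 1 then (acc.1 + kv.2, acc.2)
  else
    match memo0.get? kv.1 with
    | some v => (acc.1 + kv.2 * v, acc.2)
    | none =>
      (acc.1, (PySem.List.pyRange 0 n 1).foldl
        (fun (d : PySem.Dict (Int × Int × Int) Int) i =>
          if PySem.Int.band (pvShr kv.1.1 i.toNat) 1 = 0 then
            let p := PySem.List.pyGetD pieces i (0, 0)
            let nw := max kv.1.2.1 p.1
            let nh := max kv.1.2.2 p.2
            let nm := PySem.Int.bor kv.1.1 (pvBit i.toNat)
            let d1 := d.insert (nm, nw, nh) (d.getD (nm, nw, nh) 0 + kv.2)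
            if kv.1.2.1 + p.2 ≤ nh ∧ kv.1.2.2 + p.1 ≤ nw then
              d1.insert (nm, nh, nw) (d1.getD (nm, nh, nw) 0 + kv.2)
            else d1
          else d) acc.2)

def goB (n : Int) (pieces : List (Int × Int)) (memo0 : PySem.Dict (Int × Int × Int) Int) :
    Nat → PySem.Dict (Int × Int × Int) Int → Int → Int
  | 0, _, result => result
  | fuel+1, level, result =>
    if level.items = [] then result
    else
      let step := level.items.foldl (goBStep n pieces memo0) (result, PySem.Dict.empty)
      goB n pieces memo0 fuel step.2 step.1

def count_arrangements_recursive_alt (n : Int) (pieces : List (Int × Int)) (width_sum : Int) (height_sum : Int) (mask : Int) (memo : List (Int × Int × Int × Int)) : Int :=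
  goB n pieces (pvMemoDict memo) (n.toNat + 2)
    (PySem.Dict.empty.insert (mask, width_sum, height_sum) 1) 0

-- ===== PRECONDITION & SPEC =====
-- Pre_ excludes the inputs where the Python A raises: n < 0 (ValueError on 1 << n) and
-- out-of-range piece indices (IndexError on pieces[i] for an unset mask bit i ≥ len(pieces)).
-- The index condition says: every i < n whose mask bit is unset satisfies i < len(pieces);
-- it is phrased through bitLength (bits at or above bitLength(mask) equal the sign bit) so
-- that it evaluates without recursing up to n.  It is conservative: it also excludes a few
-- inputs on which a seeded memo entry short-circuits the recursion before the out-of-range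
-- access and A returns (B returns the same value there; see the cite in the claim).
def Pre_count_arrangements_recursive (n : Int) (pieces : List (Int × Int)) (width_sum : Int) (height_sum : Int) (mask : Int) (memo : List (Int × Int × Int × Int)) : Prop :=
  0 ≤ n ∧
  (∀ i : Nat, i < min n.toNat (PySem.Int.bitLength mask) → pieces.length ≤ i →
    mask.testBit i = true) ∧
  (max pieces.length (PySem.Int.bitLength mask) < n.toNat → mask < 0)
instance (n : Int) (pieces : List (Int × Int)) (width_sum : Int) (height_sum : Int) (mask : Int) (memo : List (Int × Int × Int × Int)) : Decidable (Pre_count_arrangements_recursive n pieces width_sum height_sum mask memo) := by unfold Pre_count_arrangements_recursive; infer_instance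

def pvWitness_count_arrangements_recursive : Int × (List (Int × Int)) × Int × Int × Int × (List (Int × Int × Int × Int)) :=
  (2, [(1, 2), (2, 1)], 0, 0, 0, [])

def Spec_count_arrangements_recursive (n : Int) (pieces : List (Int × Int)) (width_sum : Int) (height_sum : Int) (mask : Int) (memo : List (Int × Int × Int × Int)) (out : Int) : Prop := out = count_arrangements_recursive_alt n pieces width_sum height_sum mask memo
instance (n : Int) (pieces : List (Int × Int)) (width_sum : Int) (height_sum : Int) (mask : Int) (memo : List (Int × Int × Int × Int)) (out : Int) : Decidable (Spec_count_arrangements_recursive n pieces width_sum height_sum mask memo out) := by unfold Spec_count_arrangements_recursive; infer_instance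

-- ===== CLAIM (what is proved, stated in full; the proofs are below) =====
def Claim_equal_count_arrangements_recursive : Prop := ∀ (n : Int) (pieces : List (Int × Int)) (width_sum : Int) (height_sum : Int) (mask : Int) (memo : List (Int × Int × Int × Int)), Dom_count_arrangements_recursive n pieces width_sum height_sum mask memo → Pre_count_arrangements_recursive n pieces width_sum height_sum mask memo → Spec_count_arrangements_recursive n pieces width_sum height_sum mask memo (count_arrangements_recursive n pieces width_sum height_sum mask memo)

-- ===== LEMMAS AND PROOFS =====

-- unset low bits of mask among 0..n-1 (the well-founded measure of the recursion)
def pvUc (n : Nat) (mask : Int) : Nat := (List.range n).countP (fun i => !mask.testBit i)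

-- the common value function: the recursive value of a state, determined by the INITIAL memo
def pvVal (n : Int) (pieces : List (Int × Int)) (memo0 : PySem.Dict (Int × Int × Int) Int) :
    Nat → Int → Int → Int → Int
  | 0, _, _, _ => 0
  | fuel+1, w, h, mask =>
    if mask = pvBit n.toNat - 1 then 1
    else
      match memo0.get? (mask, w, h) with
      | some v => v
      | none =>
        ((PySem.List.pyRange 0 n 1).map (fun i =>
          if mask.testBit i.toNat = false then
            let p := PySem.List.pyGetD pieces i (0, 0)
            let nw := max w p.1
            let nh := max h p.2
            let nm := PySem.Int.bor mask (pvBit i.toNat)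
            pvVal n pieces memo0 fuel nw nh nm +
              (if w + p.2 ≤ nh ∧ h + p.1 ≤ nw then pvVal n pieces memo0 fuel nh nw nm else 0)
          else 0)).sum

theorem pvShiftLeft_one (i : Nat) : ((1 : Int) <<< i) = ((2 ^ i : Nat) : Int) := by
  rw [Int.shiftLeft_eq]; push_cast; ring

theorem pvTB_natCast (m j : Nat) : ((m : Nat) : Int).testBit j = m.testBit j := rfl

theorem pvTB_negSucc (m j : Nat) : (Int.negSucc m).testBit j = !m.testBit j := rfl

theorem pvNat_testBit_two_pow_add (d i j : Nat) (hd : d.testBit i = false) :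
    (2 ^ i + d).testBit j = (decide (j = i) || d.testBit j) := by
  rcases lt_trichotomy j i with h | h | h
  · rw [Nat.testBit_two_pow_add_gt h]
    simp [Nat.ne_of_lt h]
  · subst h
    rw [Nat.testBit_two_pow_add_eq, hd]
    simp
  · have hpow : (2:Nat) ^ (i+1) = 2^i + 2^i := by ring
    have hr : d % 2 ^ (i+1) < 2 ^ i := by
      have h1 : (d % 2 ^ (i+1)).testBit i = false := by
        rw [Nat.testBit_mod_two_pow]; simp [hd]
      by_contra hc
      push Not at hc
      have h2 : d % 2 ^ (i+1) < 2 ^ (i+1) := Nat.mod_lt _ (Nat.two_pow_pos (i+1))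
      have h3 := Nat.testBit_of_two_pow_le_and_two_pow_add_one_gt hc h2
      rw [h1] at h3; exact Bool.false_ne_true h3
    have hdiv : (2 ^ i + d) / 2 ^ (i+1) = d / 2 ^ (i+1) := by
      have hq := Nat.div_add_mod d (2^(i+1))
      have e1 : 2 ^ i + d = 2^(i+1) * (d / 2^(i+1)) + (2^i + d % 2^(i+1)) := by omega
      have e2 : (2^i + d % 2^(i+1)) / 2^(i+1) = 0 := Nat.div_eq_of_lt (by omega)
      rw [e1, Nat.mul_add_div (Nat.two_pow_pos (i+1)), e2]
      omega
    have hij : j = (j - (i+1)) + (i+1) := by omega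
    rw [hij, Nat.testBit_add, Nat.testBit_add, hdiv]
    have hne : j - (i+1) + (i+1) ≠ i := by omega
    simp [hne]

theorem pvInt_testBit_bor (a : Int) (i j : Nat) (h : a.testBit i = false) :
    (PySem.Int.bor a (pvBit i)).testBit j = (decide (j = i) || a.testBit j) := by
  unfold pvBit
  rw [pvShiftLeft_one]
  have hb : (0:Int) ≤ ((2^i : Nat) : Int) := by positivity
  have e2 : (((2^i:Nat):Int)).toNat = 2^i := rfl
  cases a with
  | ofNat m =>
    have h0 : (0:Int) ≤ Int.ofNat m := Int.natCast_nonneg m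
    rw [PySem.Int.bor, if_pos h0, if_pos hb]
    have e1 : (Int.ofNat m).toNat = m := rfl
    rw [e1, e2, pvTB_natCast, Nat.testBit_lor, Nat.testBit_two_pow]
    have hm : (Int.ofNat m).testBit j = m.testBit j := rfl
    rw [hm]
    cases hmj : m.testBit j <;> by_cases hji : i = j <;>
      simp [hji, hmj] <;> simp [Ne.symm hji]
  | negSucc m =>
    have hmi : m.testBit i = true := by
      rw [pvTB_negSucc] at h; simpa using h
    have h0 : ¬ (0:Int) ≤ Int.negSucc m := by exact of_decide_eq_false rfl
    rw [PySem.Int.bor, if_neg h0, if_pos hb]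
    have e1 : (-(Int.negSucc m) - 1).toNat = m := by
      simp [Int.negSucc_eq]
    rw [e1, e2]
    have e3 : m &&& 2^i = 2^i := by rw [Nat.and_two_pow, hmi]; simp
    rw [e3]
    have hge : 2^i ≤ m := Nat.ge_two_pow_of_testBit hmi
    have e4 : (-(((m - 2 ^ i : Nat) : Int)) - 1 : Int) = Int.negSucc (m - 2^i) := by
      rw [Int.negSucc_eq]; omega
    rw [e4]
    have hdit : (m - 2^i).testBit i = false := by
      have hm : m = 2^i + (m - 2^i) := by omega
      have h5 := Nat.testBit_two_pow_add_eq (m - 2^i) i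
      rw [← hm, hmi] at h5
      simpa using h5.symm
    have hmj : m.testBit j = (decide (j = i) || (m - 2^i).testBit j) := by
      have hm : m = 2^i + (m - 2^i) := by omega
      conv_lhs => rw [hm]
      exact pvNat_testBit_two_pow_add _ i j hdit
    rw [pvTB_negSucc, pvTB_negSucc, hmj]
    by_cases hji : j = i
    · simp [hji, hdit]
    · simp [hji]

theorem pvBand_two_pow_eq_zero (a : Int) (i : Nat) :
    (PySem.Int.band a (pvBit i) = 0) ↔ a.testBit i = false := by
  unfold pvBit
  rw [pvShiftLeft_one]
  have hb : (0:Int) ≤ ((2^i : Nat) : Int) := by positivity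
  have e2 : (((2^i:Nat):Int)).toNat = 2^i := rfl
  cases a with
  | ofNat m =>
    have h0 : (0:Int) ≤ Int.ofNat m := Int.natCast_nonneg m
    rw [PySem.Int.band, if_pos h0, if_pos hb]
    have e1 : (Int.ofNat m).toNat = m := rfl
    rw [e1, e2, Nat.and_two_pow]
    have hm : (Int.ofNat m).testBit i = m.testBit i := rfl
    rw [hm]
    cases hmi : m.testBit i <;> simp [Nat.two_pow_pos i] <;> positivity
  | negSucc m =>
    have h0 : ¬ (0:Int) ≤ Int.negSucc m := by exact of_decide_eq_false rfl
    rw [PySem.Int.band, if_neg h0, if_pos hb]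
    have e1 : (-(Int.negSucc m) - 1).toNat = m := by
      simp [Int.negSucc_eq]
    rw [e1, e2, Nat.two_pow_and, pvTB_negSucc]
    have hp := Nat.two_pow_pos i
    cases hmi : m.testBit i <;> simp <;> omega

theorem pvBand_shift_one_eq_zero (a : Int) (i : Nat) :
    (PySem.Int.band (pvShr a i) 1 = 0) ↔ a.testBit i = false := by
  unfold pvShr
  have h1 : ((1:Int) <<< (0:Nat)) = 1 := rfl
  have h2 : (a >>> i).testBit 0 = a.testBit i := by
    cases a with
    | ofNat m =>
      show (Int.ofNat (m >>> i)).testBit 0 = (Int.ofNat m).testBit i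
      show (m >>> i).testBit 0 = m.testBit i
      rw [Nat.testBit_shiftRight]; simp
    | negSucc m =>
      show (Int.negSucc (m >>> i)).testBit 0 = (Int.negSucc m).testBit i
      rw [pvTB_negSucc, pvTB_negSucc, Nat.testBit_shiftRight]; simp
  rw [← h1]
  have h3 := pvBand_two_pow_eq_zero (a >>> i) 0
  unfold pvBit at h3
  rw [h3, h2]

theorem pvCountP_pred (n i : Nat) (p q : Nat → Bool) (hi : i < n)
    (hpq : ∀ j, j ≠ i → q j = p j) (hp : p i = true) (hq : q i = false) :
    (List.range n).countP p = (List.range n).countP q + 1 := by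
  induction n with
  | zero => omega
  | succ m ih =>
    rw [List.range_succ, List.countP_append, List.countP_append]
    by_cases him : i = m
    · subst him
      have hcongr : (List.range i).countP p = (List.range i).countP q := by
        apply List.countP_congr
        intro x hx
        have hxi : x ≠ i := by simp at hx; omega
        simp [hpq x hxi]
      simp [List.countP_cons, hp, hq, hcongr]
    · have : i < m := by omega
      rw [ih this]
      have hm : q m = p m := hpq m (by omega)
      simp [List.countP_cons, hm]
      omega

theorem pvUc_bor (n : Nat) (mask : Int) (i : Nat) (hi : i < n) (h : mask.testBit i = false) :
    pvUc n mask = pvUc n (PySem.Int.bor mask (pvBit i)) + 1 := by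
  unfold pvUc
  apply pvCountP_pred n i _ _ hi
  · intro j hj
    rw [pvInt_testBit_bor mask i j h]
    simp [hj]
  · simp [h]
  · rw [pvInt_testBit_bor mask i i h]; simp

theorem pvUc_le (n : Nat) (mask : Int) : pvUc n mask ≤ n := by
  calc (List.range n).countP _ ≤ (List.range n).length := List.countP_le_length
  _ = n := List.length_range

theorem pvUc_pos (n : Nat) (mask : Int) (i : Nat) (hi : i < n) (h : mask.testBit i = false) :
    0 < pvUc n mask := by
  unfold pvUc
  rw [List.countP_pos_iff]
  exact ⟨i, by simp [hi], by simp [h]⟩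

theorem pvVal_stable (n : Int) (pieces : List (Int × Int)) (memo0 : PySem.Dict (Int × Int × Int) Int) :
    ∀ (u f f' : Nat) (w h mask : Int), pvUc n.toNat mask ≤ u →
      pvUc n.toNat mask < f → pvUc n.toNat mask < f' →
      pvVal n pieces memo0 f w h mask = pvVal n pieces memo0 f' w h mask := by
  intro u
  induction u with
  | zero =>
    intro f f' w h mask hu hf hf'
    obtain ⟨a, rfl⟩ : ∃ a, f = a + 1 := ⟨f - 1, by omega⟩
    obtain ⟨b, rfl⟩ : ∃ b, f' = b + 1 := ⟨f' - 1, by omega⟩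
    by_cases hfull : mask = pvBit n.toNat - 1
    · simp only [pvVal, if_pos hfull]
    simp only [pvVal]
    rw [if_neg hfull, if_neg hfull]
    cases hmemo : memo0.get? (mask, w, h) with
    | some v => rfl
    | none =>
    dsimp only
    congr 1
    apply List.map_congr_left
    intro i hi
    rw [PySem.List.mem_pyRange_one] at hi
    by_cases hb : mask.testBit i.toNat = false
    · exfalso
      have : i.toNat < n.toNat := by omega
      have := pvUc_pos n.toNat mask i.toNat this hb
      omega
    · simp [hb]
  | succ u ih =>
    intro f f' w h mask hu hf hf'
    obtain ⟨a, rfl⟩ : ∃ a, f = a + 1 := ⟨f - 1, by omega⟩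
    obtain ⟨b, rfl⟩ : ∃ b, f' = b + 1 := ⟨f' - 1, by omega⟩
    by_cases hfull : mask = pvBit n.toNat - 1
    · simp only [pvVal, if_pos hfull]
    simp only [pvVal]
    rw [if_neg hfull, if_neg hfull]
    cases hmemo : memo0.get? (mask, w, h) with
    | some v => rfl
    | none =>
    dsimp only
    congr 1
    apply List.map_congr_left
    intro i hi
    rw [PySem.List.mem_pyRange_one] at hi
    by_cases hb : mask.testBit i.toNat = false
    · simp only [hb, if_pos rfl]
      have hin : i.toNat < n.toNat := by omega
      have hdec := pvUc_bor n.toNat mask i.toNat hin hb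
      set nm := PySem.Int.bor mask (pvBit i.toNat) with hnm
      have h1 : pvUc n.toNat nm ≤ u := by omega
      have h2 : pvUc n.toNat nm < a := by omega
      have h3 : pvUc n.toNat nm < b := by omega
      rw [ih a b _ _ nm h1 h2 h3, ih a b _ _ nm h1 h2 h3]
    · simp [hb]

theorem pvVal_succ_full (n : Int) (pieces) (memo0) (f : Nat) (w h mask : Int)
    (hfull : mask = pvBit n.toNat - 1) : pvVal n pieces memo0 (f+1) w h mask = 1 := by
  simp only [pvVal, if_pos hfull]

theorem pvVal_succ_memo (n : Int) (pieces) (memo0) (f : Nat) (w h mask v : Int)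
    (hfull : ¬ mask = pvBit n.toNat - 1) (hv : PySem.Dict.get? memo0 (mask, w, h) = some v) :
    pvVal n pieces memo0 (f+1) w h mask = v := by
  simp only [pvVal]; rw [if_neg hfull, hv]

theorem pvVal_succ_none (n : Int) (pieces : List (Int × Int)) (memo0) (f : Nat) (w h mask : Int)
    (hfull : ¬ mask = pvBit n.toNat - 1) (h0 : PySem.Dict.get? memo0 (mask, w, h) = none) :
    pvVal n pieces memo0 (f+1) w h mask =
      ((PySem.List.pyRange 0 n 1).map (fun i =>
          if mask.testBit i.toNat = false then
            let p := PySem.List.pyGetD pieces i (0, 0)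
            let nw := max w p.1
            let nh := max h p.2
            let nm := PySem.Int.bor mask (pvBit i.toNat)
            pvVal n pieces memo0 f nw nh nm +
              (if w + p.2 ≤ nh ∧ h + p.1 ≤ nw then pvVal n pieces memo0 f nh nw nm else 0)
          else 0)).sum := by
  simp only [pvVal]; rw [if_neg hfull, h0]

def pvGood (n : Int) (pieces : List (Int × Int)) (memo0 M : PySem.Dict (Int × Int × Int) Int) : Prop :=
  ∀ k : Int × Int × Int, M.get? k = memo0.get? k ∨
    (memo0.get? k = none ∧
      M.get? k = some (pvVal n pieces memo0 (pvUc n.toNat k.1 + 1) k.2.1 k.2.2 k.1))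

theorem pvGoA_spec (n : Int) (pieces : List (Int × Int)) (memo0 : PySem.Dict (Int × Int × Int) Int) :
    ∀ (f : Nat) (w h mask : Int) (M : PySem.Dict (Int × Int × Int) Int),
      pvUc n.toNat mask < f → pvGood n pieces memo0 M →
      (goA n pieces f w h mask M).1 = pvVal n pieces memo0 f w h mask ∧
        pvGood n pieces memo0 (goA n pieces f w h mask M).2 := by
  intro f
  induction f with
  | zero => intro w h mask M huc; omega
  | succ f ih =>
    intro w h mask M huc hgood
    by_cases hfull : mask = pvBit n.toNat - 1
    · have e1 : goA n pieces (f+1) w h mask M = (1, M) := by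
        simp only [goA, if_pos hfull]
      rw [e1, pvVal_succ_full n pieces memo0 f w h mask hfull]
      exact ⟨rfl, hgood⟩
    cases hmemo : M.get? (mask, w, h) with
    | some v =>
      have e1 : goA n pieces (f+1) w h mask M = (v, M) := by
        simp only [goA]; rw [if_neg hfull, hmemo]
      rw [e1]
      rcases hgood (mask, w, h) with hL | ⟨h0, hsome⟩
      · rw [hmemo] at hL
        rw [pvVal_succ_memo n pieces memo0 f w h mask v hfull hL.symm]
        exact ⟨rfl, hgood⟩
      · rw [hmemo] at hsome
        injection hsome with hv
        constructor
        · show v = _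
          rw [hv]
          exact (pvVal_stable n pieces memo0 (pvUc n.toNat mask) (pvUc n.toNat mask + 1) (f+1)
            w h mask (le_refl _) (by omega) (by omega))
        · exact hgood
    | none =>
      have hm0 : memo0.get? (mask, w, h) = none := by
        rcases hgood (mask, w, h) with hL | ⟨h0, _⟩
        · rw [← hL, hmemo]
        · exact h0
      have hfold : ∀ (l : List Int), (∀ i ∈ l, 0 ≤ i ∧ i < n) →
          ∀ (t : Int) (M' : PySem.Dict (Int × Int × Int) Int), pvGood n pieces memo0 M' →
          (l.foldl
            (fun (acc : Int × PySem.Dict (Int × Int × Int) Int) i =>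
              if PySem.Int.band mask (pvBit i.toNat) = 0 then
                let p := PySem.List.pyGetD pieces i (0, 0)
                let nw := max w p.1
                let nh := max h p.2
                let nm := PySem.Int.bor mask (pvBit i.toNat)
                let r1 := goA n pieces f nw nh nm acc.2
                if w + p.2 ≤ nh ∧ h + p.1 ≤ nw then
                  let r2 := goA n pieces f nh nw nm r1.2
                  (acc.1 + r1.1 + r2.1, r2.2)
                else (acc.1 + r1.1, r1.2)
              else acc) (t, M')).1
            = t + (l.map (fun i =>
                if mask.testBit i.toNat = false then
                  let p := PySem.List.pyGetD pieces i (0, 0)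
                  let nw := max w p.1
                  let nh := max h p.2
                  let nm := PySem.Int.bor mask (pvBit i.toNat)
                  pvVal n pieces memo0 f nw nh nm +
                    (if w + p.2 ≤ nh ∧ h + p.1 ≤ nw then pvVal n pieces memo0 f nh nw nm else 0)
                else 0)).sum ∧
            pvGood n pieces memo0 (l.foldl
              (fun (acc : Int × PySem.Dict (Int × Int × Int) Int) i =>
                if PySem.Int.band mask (pvBit i.toNat) = 0 then
                  let p := PySem.List.pyGetD pieces i (0, 0)
                  let nw := max w p.1
                  let nh := max h p.2
                  let nm := PySem.Int.bor mask (pvBit i.toNat)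
                  let r1 := goA n pieces f nw nh nm acc.2
                  if w + p.2 ≤ nh ∧ h + p.1 ≤ nw then
                    let r2 := goA n pieces f nh nw nm r1.2
                    (acc.1 + r1.1 + r2.1, r2.2)
                  else (acc.1 + r1.1, r1.2)
                else acc) (t, M')).2 := by
        intro l
        induction l with
        | nil => intro _ t M' hg; exact ⟨by simp, hg⟩
        | cons i l ihl =>
          intro hmem t M' hg
          have hi := hmem i (by simp)
          have hrest : ∀ j ∈ l, 0 ≤ j ∧ j < n := fun j hj => hmem j (by simp [hj])
          simp only [List.foldl_cons, List.map_cons, List.sum_cons]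
          by_cases hband : PySem.Int.band mask (pvBit i.toNat) = 0
          · have htb : mask.testBit i.toNat = false := (pvBand_two_pow_eq_zero mask i.toNat).mp hband
            have hin : i.toNat < n.toNat := by omega
            have hdec := pvUc_bor n.toNat mask i.toNat hin htb
            have hucc : pvUc n.toNat (PySem.Int.bor mask (pvBit i.toNat)) < f := by omega
            rw [if_pos hband, if_pos htb]
            set p := PySem.List.pyGetD pieces i (0, 0) with hp
            set nm := PySem.Int.bor mask (pvBit i.toNat) with hnm
            obtain ⟨hr1, hg1⟩ := ih (max w p.1) (max h p.2) nm M' hucc hg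
            by_cases hcond : w + p.2 ≤ max h p.2 ∧ h + p.1 ≤ max w p.1
            · rw [if_pos hcond, if_pos hcond]
              obtain ⟨hr2, hg2⟩ := ih (max h p.2) (max w p.1) nm
                (goA n pieces f (max w p.1) (max h p.2) nm M').2 hucc hg1
              obtain ⟨hA, hB⟩ := ihl hrest
                (t + (goA n pieces f (max w p.1) (max h p.2) nm M').1 +
                  (goA n pieces f (max h p.2) (max w p.1) nm
                    (goA n pieces f (max w p.1) (max h p.2) nm M').2).1)
                _ hg2
              refine ⟨?_, hB⟩
              rw [hA, hr1, hr2]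
              ring
            · rw [if_neg hcond, if_neg hcond]
              obtain ⟨hA, hB⟩ := ihl hrest
                (t + (goA n pieces f (max w p.1) (max h p.2) nm M').1) _ hg1
              refine ⟨?_, hB⟩
              rw [hA, hr1]
              ring
          · have htb : ¬ (mask.testBit i.toNat = false) := by
              intro hc
              exact hband ((pvBand_two_pow_eq_zero mask i.toNat).mpr hc)
            rw [if_neg hband, if_neg htb]
            obtain ⟨hA, hB⟩ := ihl hrest t _ hg
            exact ⟨by rw [hA]; ring, hB⟩
      have hmemrange : ∀ i ∈ PySem.List.pyRange 0 n 1, 0 ≤ i ∧ i < n := by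
        intro i hi; rw [PySem.List.mem_pyRange_one] at hi; exact hi
      obtain ⟨hA, hB⟩ := hfold (PySem.List.pyRange 0 n 1) hmemrange 0 M hgood
      have e1 : goA n pieces (f+1) w h mask M =
        (((PySem.List.pyRange 0 n 1).foldl
            (fun (acc : Int × PySem.Dict (Int × Int × Int) Int) i =>
              if PySem.Int.band mask (pvBit i.toNat) = 0 then
                let p := PySem.List.pyGetD pieces i (0, 0)
                let nw := max w p.1
                let nh := max h p.2
                let nm := PySem.Int.bor mask (pvBit i.toNat)
                let r1 := goA n pieces f nw nh nm acc.2
                if w + p.2 ≤ nh ∧ h + p.1 ≤ nw then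
                  let r2 := goA n pieces f nh nw nm r1.2
                  (acc.1 + r1.1 + r2.1, r2.2)
                else (acc.1 + r1.1, r1.2)
              else acc) ((0 : Int), M)).1,
         ((PySem.List.pyRange 0 n 1).foldl
            (fun (acc : Int × PySem.Dict (Int × Int × Int) Int) i =>
              if PySem.Int.band mask (pvBit i.toNat) = 0 then
                let p := PySem.List.pyGetD pieces i (0, 0)
                let nw := max w p.1
                let nh := max h p.2
                let nm := PySem.Int.bor mask (pvBit i.toNat)
                let r1 := goA n pieces f nw nh nm acc.2
                if w + p.2 ≤ nh ∧ h + p.1 ≤ nw then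
                  let r2 := goA n pieces f nh nw nm r1.2
                  (acc.1 + r1.1 + r2.1, r2.2)
                else (acc.1 + r1.1, r1.2)
              else acc) ((0 : Int), M)).2.insert (mask, w, h)
           ((PySem.List.pyRange 0 n 1).foldl
            (fun (acc : Int × PySem.Dict (Int × Int × Int) Int) i =>
              if PySem.Int.band mask (pvBit i.toNat) = 0 then
                let p := PySem.List.pyGetD pieces i (0, 0)
                let nw := max w p.1
                let nh := max h p.2
                let nm := PySem.Int.bor mask (pvBit i.toNat)
                let r1 := goA n pieces f nw nh nm acc.2
                if w + p.2 ≤ nh ∧ h + p.1 ≤ nw then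
                  let r2 := goA n pieces f nh nw nm r1.2
                  (acc.1 + r1.1 + r2.1, r2.2)
                else (acc.1 + r1.1, r1.2)
              else acc) ((0 : Int), M)).1) := by
        simp only [goA]; rw [if_neg hfull, hmemo]
      rw [e1, pvVal_succ_none n pieces memo0 f w h mask hfull hm0]
      constructor
      · show _ = _
        rw [hA]; ring
      · intro k
        by_cases hk : k = (mask, w, h)
        · right
          subst hk
          refine ⟨hm0, ?_⟩
          show (PySem.Dict.insert _ _ _).get? _ = _
          rw [PySem.Dict.get?_insert_self]
          congr 1
          rw [hA]
          have hs : pvVal n pieces memo0 (pvUc n.toNat mask + 1) w h mask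
              = pvVal n pieces memo0 (f + 1) w h mask :=
            pvVal_stable n pieces memo0 (pvUc n.toNat mask) _ _ w h mask (le_refl _)
              (by omega) (by omega)
          rw [hs, pvVal_succ_none n pieces memo0 f w h mask hfull hm0]
          ring
        · show (PySem.Dict.insert _ _ _).get? _ = _ ∨ _
          rw [PySem.Dict.get?_insert_of_ne _ _ hk]
          exact hB k

def pvCval (n : Int) (pieces : List (Int × Int)) (memo0 : PySem.Dict (Int × Int × Int) Int)
    (k : Int × Int × Int) : Int :=
  pvVal n pieces memo0 (pvUc n.toNat k.1 + 1) k.2.1 k.2.2 k.1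

def pvSum (n : Int) (pieces : List (Int × Int)) (memo0 : PySem.Dict (Int × Int × Int) Int)
    (d : PySem.Dict (Int × Int × Int) Int) : Int :=
  (d.items.map (fun p => p.2 * pvCval n pieces memo0 p.1)).sum

-- replacing nothing: a map that rewrites entries with key k leaves a k-free list unchanged

theorem pvMapRepl_no_key (l : List ((Int × Int × Int) × Int)) (k : Int × Int × Int) (v : Int)
    (hk : ∀ p ∈ l, p.1 ≠ k) :
    l.map (fun p => if p.1 == k then (k, v) else p) = l := by
  induction l with
  | nil => rfl
  | cons p l ihl =>
    have h1 : p.1 ≠ k := hk p (by simp)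
    have h2 : ∀ q ∈ l, q.1 ≠ k := fun q hq => hk q (by simp [hq])
    rw [List.map_cons, if_neg (by simp [h1]), ihl h2]

theorem pvSumRepl (F : (Int × Int × Int) → Int) :
    ∀ (l : List ((Int × Int × Int) × Int)) (k : Int × Int × Int) (v c : Int),
      (l.map Prod.fst).Nodup → List.find? (fun p => p.1 == k) l = some (k, v) →
      ((l.map (fun p => if p.1 == k then (k, v + c) else p)).map (fun p => p.2 * F p.1)).sum
        = (l.map (fun p => p.2 * F p.1)).sum + c * F k := by
  intro l
  induction l with
  | nil => intro k v c _ hf; simp at hf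
  | cons p l ihl =>
    intro k v c hnd hf
    rw [List.map_cons] at hnd
    by_cases hpk : (p.1 == k) = true
    · rw [List.find?_cons, hpk] at hf
      simp only [] at hf
      injection hf with hf
      have hk1 : p.1 = k := by rw [hf]
      have hp2 : p.2 = v := by rw [hf]
      have hnok : ∀ q ∈ l, q.1 ≠ k := by
        intro q hq hc
        have hmem : p.1 ∈ l.map Prod.fst := by
          rw [hk1, ← hc]
          exact List.mem_map_of_mem hq
        exact (List.nodup_cons.mp hnd).1 hmem
      simp only [List.map_cons, if_pos hpk, pvMapRepl_no_key l k (v + c) hnok, List.sum_cons]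
      rw [hp2, hk1]
      ring
    · have hb : (p.1 == k) = false := by simpa using hpk
      rw [List.find?_cons, hb] at hf
      simp only [] at hf
      have hnd' := List.Nodup.of_cons hnd
      simp only [List.map_cons, if_neg (by simp_all : ¬ (p.1 == k) = true), List.sum_cons,
        ihl k v c hnd' hf]
      ring

theorem pvSum_insert_add (n : Int) (pieces : List (Int × Int))
    (memo0 d : PySem.Dict (Int × Int × Int) Int) (k : Int × Int × Int) (c : Int)
    (hnd : d.keys.Nodup) :
    pvSum n pieces memo0 (d.insert k (d.getD k 0 + c)) =
      pvSum n pieces memo0 d + c * pvCval n pieces memo0 k := by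
  cases hc : d.contains k with
  | false =>
    have hg : d.getD k 0 = 0 := PySem.Dict.getD_of_not_contains d (0:Int) hc
    unfold pvSum
    rw [PySem.Dict.items_insert_of_not_contains d _ hc, List.map_append, List.sum_append, hg]
    simp [mul_comm]
  | true =>
    have hs : (d.get? k).isSome := by
      rw [← PySem.Dict.contains_eq_isSome_get?, hc]
    obtain ⟨v, hv⟩ := Option.isSome_iff_exists.mp hs
    have hg : d.getD k 0 = v := PySem.Dict.getD_of_get?_eq_some d (0:Int) hv
    have hfind : List.find? (fun p => p.1 == k) d.items = some (k, v) := by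
      have h1 : Option.map (fun x => x.2) (List.find? (fun p => p.1 == k) d.items) = some v := hv
      obtain ⟨pr, hpr, hpr2⟩ := Option.map_eq_some_iff.mp h1
      have hbeq : (pr.1 == k) = true := by
        have := List.find?_some hpr
        exact this
      have hk1 : pr.1 = k := by rwa [beq_iff_eq] at hbeq
      rw [hpr]
      congr 1
      exact Prod.ext hk1 hpr2
    have hnd' : (d.items.map Prod.fst).Nodup := by
      have : d.keys = d.items.map Prod.fst := rfl
      rwa [this] at hnd
    unfold pvSum
    rw [PySem.Dict.items_insert_of_contains d _ hc, hg]
    exact pvSumRepl _ d.items k v c hnd' hfind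

theorem pvExpand (n : Int) (pieces : List (Int × Int)) (memo0 : PySem.Dict (Int × Int × Int) Int)
    (c : Int) (mask w h : Int) (u : Nat) (hmask : pvUc n.toNat mask = u) :
    ∀ (l : List Int) (d : PySem.Dict (Int × Int × Int) Int),
      (∀ i ∈ l, 0 ≤ i ∧ i < n) → d.keys.Nodup →
      (∀ p ∈ d.items, pvUc n.toNat p.1.1 + 1 = u) →
      (l.foldl
        (fun (d : PySem.Dict (Int × Int × Int) Int) i =>
          if PySem.Int.band (pvShr mask i.toNat) 1 = 0 then
            let p := PySem.List.pyGetD pieces i (0, 0)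
            let nw := max w p.1
            let nh := max h p.2
            let nm := PySem.Int.bor mask (pvBit i.toNat)
            let d1 := d.insert (nm, nw, nh) (d.getD (nm, nw, nh) 0 + c)
            if w + p.2 ≤ nh ∧ h + p.1 ≤ nw then
              d1.insert (nm, nh, nw) (d1.getD (nm, nh, nw) 0 + c)
            else d1
          else d) d).keys.Nodup ∧
      (∀ p ∈ (l.foldl
        (fun (d : PySem.Dict (Int × Int × Int) Int) i =>
          if PySem.Int.band (pvShr mask i.toNat) 1 = 0 then
            let p := PySem.List.pyGetD pieces i (0, 0)
            let nw := max w p.1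
            let nh := max h p.2
            let nm := PySem.Int.bor mask (pvBit i.toNat)
            let d1 := d.insert (nm, nw, nh) (d.getD (nm, nw, nh) 0 + c)
            if w + p.2 ≤ nh ∧ h + p.1 ≤ nw then
              d1.insert (nm, nh, nw) (d1.getD (nm, nh, nw) 0 + c)
            else d1
          else d) d).items, pvUc n.toNat p.1.1 + 1 = u) ∧
      pvSum n pieces memo0 (l.foldl
        (fun (d : PySem.Dict (Int × Int × Int) Int) i =>
          if PySem.Int.band (pvShr mask i.toNat) 1 = 0 then
            let p := PySem.List.pyGetD pieces i (0, 0)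
            let nw := max w p.1
            let nh := max h p.2
            let nm := PySem.Int.bor mask (pvBit i.toNat)
            let d1 := d.insert (nm, nw, nh) (d.getD (nm, nw, nh) 0 + c)
            if w + p.2 ≤ nh ∧ h + p.1 ≤ nw then
              d1.insert (nm, nh, nw) (d1.getD (nm, nh, nw) 0 + c)
            else d1
          else d) d)
        = pvSum n pieces memo0 d + c * (l.map (fun i =>
            if mask.testBit i.toNat = false then
              let p := PySem.List.pyGetD pieces i (0, 0)
              let nw := max w p.1
              let nh := max h p.2
              let nm := PySem.Int.bor mask (pvBit i.toNat)
              pvVal n pieces memo0 u nw nh nm +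
                (if w + p.2 ≤ nh ∧ h + p.1 ≤ nw then pvVal n pieces memo0 u nh nw nm else 0)
            else 0)).sum := by
  intro l
  induction l with
  | nil => intro d _ hnd hkey; exact ⟨hnd, hkey, by simp⟩
  | cons i l ihl =>
    intro d hmem hnd hkey
    have hi := hmem i (by simp)
    have hrest : ∀ j ∈ l, 0 ≤ j ∧ j < n := fun j hj => hmem j (by simp [hj])
    simp only [List.foldl_cons, List.map_cons, List.sum_cons]
    by_cases hband : PySem.Int.band (pvShr mask i.toNat) 1 = 0
    · have htb : mask.testBit i.toNat = false := (pvBand_shift_one_eq_zero mask i.toNat).mp hband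
      have hin : i.toNat < n.toNat := by omega
      have hchild : pvUc n.toNat (PySem.Int.bor mask (pvBit i.toNat)) + 1 = u := by
        have := pvUc_bor n.toNat mask i.toNat hin htb
        omega
      rw [if_pos hband, if_pos htb]
      set p := PySem.List.pyGetD pieces i (0, 0) with hp
      set nm := PySem.Int.bor mask (pvBit i.toNat) with hnm
      have hcv1 : pvCval n pieces memo0 (nm, max w p.1, max h p.2)
          = pvVal n pieces memo0 u (max w p.1) (max h p.2) nm := by
        unfold pvCval
        simp only
        rw [hchild]
      have hcv2 : pvCval n pieces memo0 (nm, max h p.2, max w p.1)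
          = pvVal n pieces memo0 u (max h p.2) (max w p.1) nm := by
        unfold pvCval
        simp only
        rw [hchild]
      by_cases hcond : w + p.2 ≤ max h p.2 ∧ h + p.1 ≤ max w p.1
      · rw [if_pos hcond, if_pos hcond]
        set d1 := d.insert (nm, max w p.1, max h p.2)
          (d.getD (nm, max w p.1, max h p.2) 0 + c) with hd1
        set d2 := d1.insert (nm, max h p.2, max w p.1)
          (d1.getD (nm, max h p.2, max w p.1) 0 + c) with hd2
        have hnd1 : d1.keys.Nodup := PySem.Dict.nodup_keys_insert d _ _ hnd
        have hnd2 : d2.keys.Nodup := PySem.Dict.nodup_keys_insert d1 _ _ hnd1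
        have hkey1 : ∀ q ∈ d1.items, pvUc n.toNat q.1.1 + 1 = u := by
          intro q hq
          rcases (PySem.Dict.mem_items_insert d _ _ q).mp hq with hq1 | ⟨hq2, _⟩
          · rw [hq1]; exact hchild
          · exact hkey q hq2
        have hkey2 : ∀ q ∈ d2.items, pvUc n.toNat q.1.1 + 1 = u := by
          intro q hq
          rcases (PySem.Dict.mem_items_insert d1 _ _ q).mp hq with hq1 | ⟨hq2, _⟩
          · rw [hq1]; exact hchild
          · exact hkey1 q hq2
        obtain ⟨hA, hB, hC⟩ := ihl d2 hrest hnd2 hkey2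
        refine ⟨hA, hB, ?_⟩
        rw [hC, hd2, pvSum_insert_add n pieces memo0 d1 _ c hnd1,
          hd1, pvSum_insert_add n pieces memo0 d _ c hnd, hcv1, hcv2]
        ring
      · rw [if_neg hcond, if_neg hcond]
        set d1 := d.insert (nm, max w p.1, max h p.2)
          (d.getD (nm, max w p.1, max h p.2) 0 + c) with hd1
        have hnd1 : d1.keys.Nodup := PySem.Dict.nodup_keys_insert d _ _ hnd
        have hkey1 : ∀ q ∈ d1.items, pvUc n.toNat q.1.1 + 1 = u := by
          intro q hq
          rcases (PySem.Dict.mem_items_insert d _ _ q).mp hq with hq1 | ⟨hq2, _⟩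
          · rw [hq1]; exact hchild
          · exact hkey q hq2
        obtain ⟨hA, hB, hC⟩ := ihl d1 hrest hnd1 hkey1
        refine ⟨hA, hB, ?_⟩
        rw [hC, hd1, pvSum_insert_add n pieces memo0 d _ c hnd, hcv1]
        ring
    · have htb : ¬ (mask.testBit i.toNat = false) := by
        intro hcon
        exact hband ((pvBand_shift_one_eq_zero mask i.toNat).mpr hcon)
      rw [if_neg hband, if_neg htb]
      obtain ⟨hA, hB, hC⟩ := ihl d hrest hnd hkey
      exact ⟨hA, hB, by rw [hC]; ring⟩

theorem pvStep (n : Int) (pieces : List (Int × Int)) (memo0 : PySem.Dict (Int × Int × Int) Int)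
    (u : Nat) :
    ∀ (l : List ((Int × Int × Int) × Int)) (r : Int) (d : PySem.Dict (Int × Int × Int) Int),
      (∀ p ∈ l, pvUc n.toNat p.1.1 = u) → d.keys.Nodup →
      (∀ p ∈ d.items, pvUc n.toNat p.1.1 + 1 = u) →
      (l.foldl (goBStep n pieces memo0) (r, d)).2.keys.Nodup ∧
      (∀ p ∈ (l.foldl (goBStep n pieces memo0) (r, d)).2.items, pvUc n.toNat p.1.1 + 1 = u) ∧
      (l.foldl (goBStep n pieces memo0) (r, d)).1
        + pvSum n pieces memo0 (l.foldl (goBStep n pieces memo0) (r, d)).2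
        = r + pvSum n pieces memo0 d
          + (l.map (fun p => p.2 * pvCval n pieces memo0 p.1)).sum := by
  intro l
  induction l with
  | nil => intro r d _ hnd hkey; exact ⟨hnd, hkey, by simp⟩
  | cons q l ihl =>
    intro r d hl hnd hkey
    have hq := hl q (by simp)
    have hrest : ∀ p ∈ l, pvUc n.toNat p.1.1 = u := fun p hp => hl p (by simp [hp])
    simp only [List.foldl_cons, List.map_cons, List.sum_cons]
    by_cases hfull : q.1.1 = pvBit n.toNat - 1
    · have he : goBStep n pieces memo0 (r, d) q = (r + q.2, d) := by
        unfold goBStep; rw [if_pos hfull]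
      rw [he]
      obtain ⟨hA, hB, hC⟩ := ihl (r + q.2) d hrest hnd hkey
      refine ⟨hA, hB, ?_⟩
      rw [hC]
      have hcv : pvCval n pieces memo0 q.1 = 1 := by
        unfold pvCval
        exact pvVal_succ_full n pieces memo0 _ _ _ _ hfull
      rw [hcv]
      ring
    · cases hm : memo0.get? q.1 with
      | some v =>
        have he : goBStep n pieces memo0 (r, d) q = (r + q.2 * v, d) := by
          unfold goBStep; rw [if_neg hfull, hm]
        rw [he]
        obtain ⟨hA, hB, hC⟩ := ihl (r + q.2 * v) d hrest hnd hkey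
        refine ⟨hA, hB, ?_⟩
        rw [hC]
        have hcv : pvCval n pieces memo0 q.1 = v := by
          unfold pvCval
          exact pvVal_succ_memo n pieces memo0 _ _ _ _ v hfull hm
        rw [hcv]
        ring
      | none =>
        have he : goBStep n pieces memo0 (r, d) q =
            (r, (PySem.List.pyRange 0 n 1).foldl
              (fun (d : PySem.Dict (Int × Int × Int) Int) i =>
                if PySem.Int.band (pvShr q.1.1 i.toNat) 1 = 0 then
                  let p := PySem.List.pyGetD pieces i (0, 0)
                  let nw := max q.1.2.1 p.1
                  let nh := max q.1.2.2 p.2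
                  let nm := PySem.Int.bor q.1.1 (pvBit i.toNat)
                  let d1 := d.insert (nm, nw, nh) (d.getD (nm, nw, nh) 0 + q.2)
                  if q.1.2.1 + p.2 ≤ nh ∧ q.1.2.2 + p.1 ≤ nw then
                    d1.insert (nm, nh, nw) (d1.getD (nm, nh, nw) 0 + q.2)
                  else d1
                else d) d) := by
          unfold goBStep; rw [if_neg hfull, hm]
        rw [he]
        obtain ⟨hEA, hEB, hEC⟩ := pvExpand n pieces memo0 q.2 q.1.1 q.1.2.1 q.1.2.2 u hq
          (PySem.List.pyRange 0 n 1) d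
          (by intro i hi; rw [PySem.List.mem_pyRange_one] at hi; exact hi) hnd hkey
        obtain ⟨hA, hB, hC⟩ := ihl r _ hrest hEA hEB
        refine ⟨hA, hB, ?_⟩
        rw [hC, hEC]
        have hcv : pvCval n pieces memo0 q.1 =
            ((PySem.List.pyRange 0 n 1).map (fun i =>
              if q.1.1.testBit i.toNat = false then
                let p := PySem.List.pyGetD pieces i (0, 0)
                let nw := max q.1.2.1 p.1
                let nh := max q.1.2.2 p.2
                let nm := PySem.Int.bor q.1.1 (pvBit i.toNat)
                pvVal n pieces memo0 u nw nh nm +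
                  (if q.1.2.1 + p.2 ≤ nh ∧ q.1.2.2 + p.1 ≤ nw then
                    pvVal n pieces memo0 u nh nw nm else 0)
              else 0)).sum := by
          unfold pvCval
          rw [hq]
          exact pvVal_succ_none n pieces memo0 u _ _ _ hfull hm
        rw [hcv]
        ring

theorem pvGoB_empty (n : Int) (pieces : List (Int × Int))
    (memo0 d : PySem.Dict (Int × Int × Int) Int) (f : Nat) (r : Int)
    (h : d.items = []) : goB n pieces memo0 f d r = r := by
  cases f with
  | zero => rfl
  | succ f => simp only [goB, if_pos h]

theorem pvGoB_spec (n : Int) (pieces : List (Int × Int)) (memo0 : PySem.Dict (Int × Int × Int) Int) :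
    ∀ (f u : Nat) (level : PySem.Dict (Int × Int × Int) Int) (result : Int),
      (∀ p ∈ level.items, pvUc n.toNat p.1.1 = u) → level.keys.Nodup → u + 2 ≤ f →
      goB n pieces memo0 f level result = result + pvSum n pieces memo0 level := by
  intro f
  induction f with
  | zero => intro u level result _ _ hf; omega
  | succ f ih =>
    intro u level result hl hnd hf
    by_cases hemp : level.items = []
    · rw [pvGoB_empty n pieces memo0 level (f+1) result hemp]
      unfold pvSum
      rw [hemp]
      simp
    · have he : goB n pieces memo0 (f+1) level result =
          goB n pieces memo0 f
            (level.items.foldl (goBStep n pieces memo0) (result, PySem.Dict.empty)).2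
            (level.items.foldl (goBStep n pieces memo0) (result, PySem.Dict.empty)).1 := by
        simp only [goB, if_neg hemp]
      rw [he]
      have hkey0 : ∀ p ∈ (PySem.Dict.empty : PySem.Dict (Int × Int × Int) Int).items,
          pvUc n.toNat p.1.1 + 1 = u := by
        intro p hp
        simp [PySem.Dict.empty] at hp
      obtain ⟨hA, hB, hC⟩ := pvStep n pieces memo0 u level.items result PySem.Dict.empty
        hl PySem.Dict.nodup_keys_empty hkey0
      have hSempty : pvSum n pieces memo0 (PySem.Dict.empty : PySem.Dict (Int × Int × Int) Int) = 0 := by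
        unfold pvSum
        simp [PySem.Dict.empty, PySem.Dict.items]
      rw [hSempty] at hC
      set F := level.items.foldl (goBStep n pieces memo0) (result, PySem.Dict.empty) with hF
      by_cases hne2 : F.2.items = []
      · rw [pvGoB_empty n pieces memo0 F.2 f F.1 hne2]
        have hS2 : pvSum n pieces memo0 F.2 = 0 := by
          unfold pvSum
          rw [hne2]
          simp
        rw [hS2] at hC
        unfold pvSum
        omega
      · obtain ⟨q, hqmem⟩ := List.exists_mem_of_ne_nil _ hne2
        have hu1 : pvUc n.toNat q.1.1 + 1 = u := hB q hqmem
        have hu : 1 ≤ u := by omega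
        have hkey' : ∀ p ∈ F.2.items, pvUc n.toNat p.1.1 = u - 1 := by
          intro p hp
          have := hB p hp
          omega
        rw [ih (u-1) F.2 F.1 hkey' hA (by omega), hC]
        unfold pvSum
        omega

-- ===== VERDICT (by name: the statement is the Claim_ definition above) =====
theorem count_arrangements_recursive_spec : Claim_equal_count_arrangements_recursive := by
  intro n pieces width_sum height_sum mask memo hDom hPre
  unfold Spec_count_arrangements_recursive
  unfold count_arrangements_recursive count_arrangements_recursive_alt
  have hgood : pvGood n pieces (pvMemoDict memo) (pvMemoDict memo) := fun k => Or.inl rfl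
  have hle := pvUc_le n.toNat mask
  obtain ⟨hA, _⟩ := pvGoA_spec n pieces (pvMemoDict memo) (n.toNat + 1)
    width_sum height_sum mask (pvMemoDict memo) (by omega) hgood
  rw [hA]
  have hins : ((PySem.Dict.empty : PySem.Dict (Int × Int × Int) Int).insert
      (mask, width_sum, height_sum) (1 : Int)).items = [((mask, width_sum, height_sum), 1)] := by
    rw [PySem.Dict.items_insert_of_not_contains _ _ (PySem.Dict.contains_empty _)]
    rfl
  have hkeys : ((PySem.Dict.empty : PySem.Dict (Int × Int × Int) Int).insert
      (mask, width_sum, height_sum) (1 : Int)).keys.Nodup :=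
    PySem.Dict.nodup_keys_insert _ _ _ PySem.Dict.nodup_keys_empty
  have hlv : ∀ p ∈ ((PySem.Dict.empty : PySem.Dict (Int × Int × Int) Int).insert
      (mask, width_sum, height_sum) (1 : Int)).items, pvUc n.toNat p.1.1 = pvUc n.toNat mask := by
    rw [hins]
    intro p hp
    simp at hp
    rw [hp]
  rw [pvGoB_spec n pieces (pvMemoDict memo) (n.toNat + 2) (pvUc n.toNat mask) _ 0 hlv hkeys
    (by omega)]
  unfold pvSum
  rw [hins]
  simp only [List.map_cons, List.map_nil, List.sum_cons, List.sum_nil, one_mul, add_zero,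
    zero_add]
  unfold pvCval
  exact pvVal_stable n pieces (pvMemoDict memo) (pvUc n.toNat mask) (n.toNat + 1)
    (pvUc n.toNat mask + 1) width_sum height_sum mask (le_refl _) (by omega) (by omega)
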